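-- pv_equiv track=rewrite | github.com/closeio/tasktiger | tasktiger/_internal.py | reversed_dotted_parts
-- ===== SOURCE A (Python) =====
-- def reversed_dotted_parts(s):
--     """
--     For a string "a.b.c", yields "a.b.c", "a.b", "a".
--     """
--     idx = -1
--     if s:
--         yield s
--     while s:
--         idx = s.rfind(".", 0, idx)
--         if idx == -1:
--             break
--         yield s[:idx]
-- ===== SOURCE B (Python) =====
-- def reversed_dotted_parts(s):
--     """
--     For a string "a.b.c", yields "a.b.c", "a.b", "a".
--     """
--     # one forward pass builds the table of cut positions (last char excluded,
--     # matching rfind's end bound of -1), then one reverse emission pass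
--     cuts = [i for i in range(len(s) - 1) if s[i] == "."]
--     if s:
--         yield s
--     for i in reversed(cuts):
--         yield s[:i]
-- ===== Notes on version B (the rewrite author's own statement) =====
-- stated objective: alternative
-- what changed: B replaces A's repeated rfind-from-the-right search loop by a single forward pass that builds the list of cut indices (range(len(s)-1) excludes the final character, as rfind's end bound -1 does) followed by a reverse pass emitting s[:i]; same O(n + k*n) output cost, no speed claim.
import Mathlib
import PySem

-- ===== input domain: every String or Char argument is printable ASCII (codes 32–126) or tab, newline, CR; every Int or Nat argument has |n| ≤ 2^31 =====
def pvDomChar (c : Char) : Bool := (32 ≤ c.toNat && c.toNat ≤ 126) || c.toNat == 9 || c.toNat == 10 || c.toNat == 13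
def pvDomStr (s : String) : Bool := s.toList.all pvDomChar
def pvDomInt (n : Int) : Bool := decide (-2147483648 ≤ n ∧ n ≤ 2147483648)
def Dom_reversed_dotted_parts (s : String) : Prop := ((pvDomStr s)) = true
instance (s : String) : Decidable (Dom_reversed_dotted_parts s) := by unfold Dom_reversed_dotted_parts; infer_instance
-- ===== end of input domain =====

-- B builds the table of dot indices in one forward pass and emits prefixes in a reverse
-- pass, instead of A's repeated rfind search loop; alternative decomposition, no speed claim.

-- ===== PORT A =====
-- s.rfind(".", 0, e) for an end bound e (as a Nat, the dot at index e itself excluded):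
-- scans right-to-left, exact for the single-char needle "." used by A.
def pvRfindDotBelow (cs : List Char) : Nat → Option Nat
  | 0 => none
  | e + 1 => if cs.getD e ' ' = '.' then some e else pvRfindDotBelow cs e

theorem pvRfindDotBelow_lt {cs : List Char} {e r : Nat}
    (h : pvRfindDotBelow cs e = some r) : r < e := by
  induction e with
  | zero => simp [pvRfindDotBelow] at h
  | succ m ih =>
    unfold pvRfindDotBelow at h
    split at h
    · injection h with h'; omega
    · exact Nat.lt_succ_of_lt (ih h)

-- the while loop: idx = current end bound (after the first iteration it is the last
-- dot found); yields s[:idx] each time rfind succeeds, breaks when it returns -1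
def pvLoopA (cs : List Char) (e : Nat) : List String :=
  match h : pvRfindDotBelow cs e with
  | none => []
  | some r => String.mk (cs.take r) :: pvLoopA cs r
  termination_by e
  decreasing_by exact pvRfindDotBelow_lt h

-- initial idx = -1: rfind's end bound is len(s)-1, excluding the final character
def reversed_dotted_parts (s : String) : List String :=
  if s.toList.isEmpty then [] else s :: pvLoopA s.toList (s.toList.length - 1)

-- ===== PORT B =====
-- cuts = the dot indices below len-1, built in one forward pass
def reversed_dotted_parts_alt (s : String) : List String :=
  if s.toList.isEmpty then [] else
    s :: ((((List.range (s.toList.length - 1)).filter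
      (fun i => s.toList.getD i ' ' = '.')).reverse).map
        fun i => String.mk (s.toList.take i))

-- ===== PRECONDITION & SPEC =====
def Spec_reversed_dotted_parts (s : String) (out : List String) : Prop := out = reversed_dotted_parts_alt s
instance (s : String) (out : List String) : Decidable (Spec_reversed_dotted_parts s out) := by unfold Spec_reversed_dotted_parts; infer_instance

-- ===== CLAIM (what is proved, stated in full; the proofs are below) =====
def Claim_equal_reversed_dotted_parts : Prop := ∀ (s : String), Dom_reversed_dotted_parts s → Spec_reversed_dotted_parts s (reversed_dotted_parts s)

-- ===== LEMMAS AND PROOFS =====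

theorem pvRfindDotBelow_none {cs : List Char} {e : Nat}
    (h : pvRfindDotBelow cs e = none) : ∀ i < e, ¬ cs.getD i ' ' = '.' := by
  induction e with
  | zero => intro i hi; omega
  | succ m ih =>
    unfold pvRfindDotBelow at h
    split at h
    · exact absurd h (by simp)
    · intro i hi
      rcases Nat.lt_succ_iff_lt_or_eq.mp hi with h' | h'
      · exact ih h i h'
      · subst h'; assumption

theorem pvRfindDotBelow_some {cs : List Char} {e r : Nat}
    (h : pvRfindDotBelow cs e = some r) :
    cs.getD r ' ' = '.' ∧ ∀ i, r < i → i < e → ¬ cs.getD i ' ' = '.' := by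
  induction e with
  | zero => simp [pvRfindDotBelow] at h
  | succ m ih =>
    unfold pvRfindDotBelow at h
    split at h
    · rename_i hp
      obtain rfl : m = r := by injection h
      exact ⟨hp, fun i h1 h2 => by omega⟩
    · rename_i hp
      obtain ⟨hr, hnone⟩ := ih h
      refine ⟨hr, fun i h1 h2 => ?_⟩
      rcases Nat.lt_succ_iff_lt_or_eq.mp h2 with h' | h'
      · exact hnone i h1 h'
      · subst h'; exact hp

-- filter of a range is unchanged when everything in [k, e) fails the predicate
theorem pvFilterRangeShrink (p : Nat → Bool) (k e : Nat) (hk : k ≤ e)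
    (h : ∀ i, k ≤ i → i < e → ¬ p i = true) :
    (List.range e).filter p = (List.range k).filter p := by
  induction e with
  | zero =>
    have : k = 0 := by omega
    rw [this]
  | succ m ih =>
    rcases Nat.eq_or_lt_of_le hk with h' | h'
    · rw [h']
    · have hm : k ≤ m := by omega
      have hpm : p m = false := Bool.not_eq_true _ ▸ h m hm (Nat.lt_succ_self m)
      rw [List.range_succ, List.filter_append, List.filter_singleton]
      simp only [hpm, Bool.cond_false, List.append_nil]
      exact ih hm (fun i h1 h2 => h i h1 (by omega))

theorem pvLoopA_eq (cs : List Char) (e : Nat) :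
    pvLoopA cs e =
      (((List.range e).filter (fun i => cs.getD i ' ' = '.')).reverse.map
        fun i => String.mk (cs.take i)) := by
  induction e using Nat.strong_induction_on with
  | _ e ih =>
    unfold pvLoopA
    split
    · rename_i h
      have hno := pvRfindDotBelow_none h
      have hnil : (List.range e).filter (fun i => cs.getD i ' ' = '.') = [] := by
        apply List.filter_eq_nil_iff.mpr
        intro i hi
        simp only [decide_eq_true_eq]
        exact hno i (List.mem_range.mp hi)
      rw [hnil]
      rfl
    · rename_i r h
      have hlt := pvRfindDotBelow_lt h
      obtain ⟨hr, hnone⟩ := pvRfindDotBelow_some h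
      have hshrink : (List.range e).filter (fun i => cs.getD i ' ' = '.') =
          (List.range (r + 1)).filter (fun i => cs.getD i ' ' = '.') := by
        apply pvFilterRangeShrink _ _ _ (by omega)
        intro i h1 h2
        exact fun hc => hnone i (by omega) h2 (of_decide_eq_true hc)
      have hr2 : decide (cs[r]?.getD ' ' = '.') = true := decide_eq_true hr
      rw [hshrink, List.range_succ, List.filter_append, ih r hlt,
        List.filter_singleton]
      simp [hr2]

-- ===== VERDICT (by name: the statement is the Claim_ definition above) =====
theorem reversed_dotted_parts_spec : Claim_equal_reversed_dotted_parts := by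
  intro s _
  unfold Spec_reversed_dotted_parts reversed_dotted_parts reversed_dotted_parts_alt
  rw [pvLoopA_eq]
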